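-- pv_equiv track=rewrite | github.com/tchtinku/Ace_Programming | Strings/MatchSpecificPattern/ConvertWordToStringOfIntegers/MatchSpecificPattern.py | generate_hash
-- ===== SOURCE A (Python) =====
-- def generate_hash(word):
--     char_map = {}
--     hash_value = []
--     unique_id = 1
--
--     for char in word:
--         if char not in char_map:
--             char_map[char] = unique_id
--             unique_id += 1
--         hash_value.append(str(char_map[char]))
--
--     return "".join(hash_value)
-- ===== SOURCE B (Python) =====
-- def generate_hash(word):
--     # Scatter algorithm: one full stamping pass per distinct character.
--     # For each distinct char (in first-occurrence order, id = 1,2,...)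
--     # stamp its id into every position of the output that holds that char.
--     out = [""] * len(word)
--     for uid, ch in enumerate(dict.fromkeys(word), 1):
--         out = [str(uid) if d == ch else o for o, d in zip(out, word)]
--     return "".join(out)
-- ===== Notes on version B (the rewrite author's own statement) =====
-- stated objective: alternative
-- what changed: A walks the word once, interleaving dict building, id counting and digit appending; B inverts the loops: it iterates over the distinct characters and, for each one, makes a full stamping pass that writes that character's id into every matching output position, joining the filled buffer afterwards.
import Mathlib
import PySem

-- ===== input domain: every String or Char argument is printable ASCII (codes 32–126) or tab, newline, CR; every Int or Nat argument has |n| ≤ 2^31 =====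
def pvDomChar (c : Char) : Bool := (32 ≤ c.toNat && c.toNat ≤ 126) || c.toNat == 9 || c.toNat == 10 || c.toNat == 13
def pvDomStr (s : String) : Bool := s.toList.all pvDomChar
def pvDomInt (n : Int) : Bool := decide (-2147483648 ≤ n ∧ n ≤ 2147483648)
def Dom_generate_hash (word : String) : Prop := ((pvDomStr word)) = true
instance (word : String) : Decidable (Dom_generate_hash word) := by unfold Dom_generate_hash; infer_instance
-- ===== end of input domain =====

-- B inverts A's loop structure: instead of one pass that assigns ids and emits digits
-- together, B loops over the distinct characters and stamps each id across the output.

-- ===== PORT A =====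
-- one loop iteration of A: state = (char_map, hash_value, unique_id)
def gaStep (s : PySem.Dict Char Int × List String × Int) (c : Char) :
    PySem.Dict Char Int × List String × Int :=
  match s with
  | (m, acc, uid) =>
    let p := if m.contains c then (m, uid) else (m.insert c uid, uid + 1)
    (p.1, acc ++ [PySem.Int.toStr (p.1.getD c 0)], p.2)

def generate_hash (word : String) : String :=
  PySem.Str.join "" (word.toList.foldl gaStep (PySem.Dict.empty, [], 1)).2.1

-- ===== PORT B =====
-- the stamping pass: [str(uid) if d == ch else o for o, d in zip(out, word)]
def gbStamp (wl : List Char) (out : List String) (p : Int × Char) : List String :=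
  (out.zip wl).map (fun q => if q.2 = p.2 then PySem.Int.toStr p.1 else q.1)

def generate_hash_alt (word : String) : String :=
  PySem.Str.join ""
    ((PySem.List.enumerate (PySem.List.dedup word.toList) 1).foldl
      (gbStamp word.toList) (List.replicate word.toList.length ""))

-- ===== PRECONDITION & SPEC =====
def Spec_generate_hash (word : String) (out : String) : Prop := out = generate_hash_alt word
instance (word : String) (out : String) : Decidable (Spec_generate_hash word out) := by unfold Spec_generate_hash; infer_instance

-- ===== CLAIM (what is proved, stated in full; the proofs are below) =====
def Claim_equal_generate_hash : Prop := ∀ (word : String), Dom_generate_hash word → Spec_generate_hash word (generate_hash word)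

-- ===== LEMMAS AND PROOFS =====

-- the function computed by a list of stamping passes, read off pass by pass
def gbApply (ps : List (Int × Char)) (f : Char → String) : Char → String :=
  match ps with
  | [] => f
  | (i, c) :: rest => gbApply rest (fun d => if d = c then PySem.Int.toStr i else f d)

lemma gbStamp_map (wl : List Char) (f : Char → String) (p : Int × Char) :
    gbStamp wl (wl.map f) p = wl.map (fun d => if d = p.2 then PySem.Int.toStr p.1 else f d) := by
  induction wl with
  | nil => rfl
  | cons x xs ih =>
    simp only [gbStamp, List.map_cons, List.zip_cons_cons] at ih ⊢
    rw [ih]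

lemma gb_fold (wl : List Char) (ps : List (Int × Char)) (f : Char → String) :
    ps.foldl (gbStamp wl) (wl.map f) = wl.map (gbApply ps f) := by
  induction ps generalizing f with
  | nil => simp [gbApply]
  | cons p rest ih =>
    cases p with
    | mk i c => rw [List.foldl_cons, gbStamp_map, ih, gbApply]

lemma gbApply_not_mem (ps : List (Int × Char)) (f : Char → String) (d : Char)
    (hd : d ∉ ps.map Prod.snd) : gbApply ps f d = f d := by
  induction ps generalizing f with
  | nil => rfl
  | cons p rest ih =>
    cases p with
    | mk i c =>
      simp only [List.map_cons, List.mem_cons, not_or] at hd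
      rw [gbApply, ih _ hd.2]
      simp [hd.1]

lemma gbApply_enumerate (s : List Char) (k : Int) (f : Char → String) (d : Char)
    (hnd : s.Nodup) (hd : d ∈ s) :
    gbApply (PySem.List.enumerate s k) f d
      = PySem.Int.toStr (k + (((PySem.List.index? s d).getD 0 : Nat) : Int)) := by
  induction s generalizing k f with
  | nil => cases hd
  | cons c cs ih =>
    rw [PySem.List.enumerate_cons, gbApply]
    rcases List.mem_cons.mp hd with hdc | hdcs
    · subst hdc
      have hnin : d ∉ cs := (List.nodup_cons.mp hnd).1
      have : d ∉ (PySem.List.enumerate cs (k + 1)).map Prod.snd := by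
        rw [PySem.List.map_snd_enumerate]; exact hnin
      rw [gbApply_not_mem _ _ _ this]
      rw [PySem.List.index?_cons_self]
      simp
    · have hne : c ≠ d := fun h => (List.nodup_cons.mp hnd).1 (h ▸ hdcs)
      rw [ih (k + 1) _ (List.nodup_cons.mp hnd).2 hdcs]
      rw [PySem.List.index?_cons_of_ne _ hne]
      have : (PySem.List.index? cs d).isSome := (PySem.List.index?_isSome_iff cs d).mpr hdcs
      rcases Option.isSome_iff_exists.mp this with ⟨n, hn⟩
      rw [hn]
      simp
      ring_nf

lemma ga_loop_inv (l : List Char) :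
    ∀ (s : List Char) (m : PySem.Dict Char Int) (acc : List String),
    s.Nodup →
    (∀ c, m.contains c = decide (c ∈ s)) →
    (∀ c ∈ s, m.getD c 0 = (((PySem.List.index? s c).getD 0 : Nat) : Int) + 1) →
    (l.foldl gaStep (m, acc, (s.length : Int) + 1)).2.1
      = acc ++ l.map (fun c =>
          PySem.Int.toStr ((((PySem.List.index? (PySem.Set.update s l) c).getD 0 : Nat) : Int) + 1)) := by
  induction l with
  | nil => intro s m acc _ _ _; simp [PySem.Set.update]
  | cons c cs ih =>
    intro s m acc hnd hcont hget
    by_cases hc : c ∈ s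
    · have hcc : m.contains c = true := by rw [hcont]; simp [hc]
      have hadd : PySem.Set.add s c = s := by simp [PySem.Set.add, hc]
      have hstep : gaStep (m, acc, (s.length : Int) + 1) c
          = (m, acc ++ [PySem.Int.toStr (m.getD c 0)], (s.length : Int) + 1) := by
        simp [gaStep, hcc]
      have hidx : PySem.List.index? (PySem.Set.update s cs) c = PySem.List.index? s c := by
        rw [PySem.Set.update_eq_append_filter, PySem.List.index?_append_of_mem _ hc]
      rw [List.foldl_cons, hstep, ih s m _ hnd hcont hget,
          PySem.Set.update_cons, hadd, List.map_cons, hidx, ← hget c hc]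
      simp
    · have hcc : m.contains c = false := by rw [hcont]; simp [hc]
      have hadd : PySem.Set.add s c = s ++ [c] := by
        simp [PySem.Set.add, hc]
      have hstep : gaStep (m, acc, (s.length : Int) + 1) c
          = (m.insert c ((s.length : Int) + 1),
             acc ++ [PySem.Int.toStr ((s.length : Int) + 1)],
             (s.length : Int) + 1 + 1) := by
        simp [gaStep, hcc, PySem.Dict.getD_insert_self]
      have hnd' : (s ++ [c]).Nodup := by
        simp [List.nodup_append, hnd]
        exact fun a ha h => hc (h ▸ ha)
      have hcont' : ∀ d, (m.insert c ((s.length : Int) + 1)).contains d = decide (d ∈ s ++ [c]) := by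
        intro d
        rw [PySem.Dict.contains_insert, hcont d]
        by_cases hd : d = c <;> simp [hd]
      have hget' : ∀ d ∈ s ++ [c], (m.insert c ((s.length : Int) + 1)).getD d 0
          = (((PySem.List.index? (s ++ [c]) d).getD 0 : Nat) : Int) + 1 := by
        intro d hd
        rcases List.mem_append.mp hd with hds | hdc
        · have hdc : d ≠ c := fun h => hc (h ▸ hds)
          rw [PySem.Dict.getD_insert_of_ne _ _ _ hdc, PySem.List.index?_append_of_mem _ hds, hget d hds]
        · have hdc : d = c := by simpa using hdc
          subst hdc
          rw [PySem.Dict.getD_insert_self, PySem.List.index?_append_singleton_self _ _ hc]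
          simp
      have hlen : ((s ++ [c]).length : Int) + 1 = (s.length : Int) + 1 + 1 := by
        simp
      have hidx : PySem.List.index? (PySem.Set.update (s ++ [c]) cs) c = some s.length := by
        rw [PySem.Set.update_eq_append_filter,
            PySem.List.index?_append_of_mem _ (List.mem_append.mpr (Or.inr (List.mem_singleton_self c))),
            PySem.List.index?_append_singleton_self s c hc]
      rw [List.foldl_cons, hstep, ← hlen, ih (s ++ [c]) _ _ hnd' hcont' hget',
          PySem.Set.update_cons, hadd, List.map_cons, hidx]
      simp

-- ===== VERDICT (by name: the statement is the Claim_ definition above) =====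
theorem generate_hash_spec : Claim_equal_generate_hash := by
  intro word _
  unfold Spec_generate_hash generate_hash generate_hash_alt
  have hA := ga_loop_inv word.toList [] PySem.Dict.empty []
    (by simp) (by intro c; simp) (by simp)
  simp only [List.length_nil, Nat.cast_zero, zero_add, List.nil_append,
    PySem.Set.update_nil_left] at hA
  rw [hA]
  have hrep : List.replicate word.toList.length "" = word.toList.map (fun _ => "") := by
    simp
  rw [hrep, gb_fold]
  congr 1
  apply List.map_congr_left
  intro d hd
  rw [gbApply_enumerate _ 1 _ d (PySem.List.nodup_dedup _) ((PySem.List.mem_dedup _ _).mpr hd)]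
  simp
  ring_nf
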